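-- pv_equiv track=rewrite | github.com/eybp/totallyobsfucatedname | trader/helpers.py | _read_until_semicolon
-- ===== SOURCE A (Python) =====
-- from typing import Dict, List, Optional, Tuple, Any, Literal, cast, Callable, Coroutine
--
-- def _read_until_semicolon(script: str, start_index: int) -> Tuple[Optional[str], int]:
--     i: int = start_index
--     depth: int = 0
--     in_str: Optional[str] = None
--     escape: bool = False
--
--     while i < len(script):
--         char: str = script[i]
--
--         if escape:
--             escape = False
--         elif char == '\\':
--             escape = True
--         elif in_str:
--             if char == in_str:
--                 in_str = None
--         elif char in ('"', "'"):
--             in_str = char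
--         elif char in '{[(':
--             depth += 1
--         elif char in '}])':
--             depth -= 1
--         elif char == ';' and depth <= 0:
--             return script[start_index:i].strip(), i
--         i += 1
--
--     return None, len(script)
-- ===== SOURCE B (Python) =====
-- def _read_until_semicolon(script, start_index):
--     n = len(script)
--     # Pass 1: build a visibility mask over the positions A visits — None for characters
--     # that are escaped or lie inside (or delimit) a string literal, the char otherwise.
--     visible = []
--     mode = ''  # '' = plain; a '\\' prefix = escape pending; a quote char = inside that string
--     for j in range(start_index, n):
--         c = script[j]
--         if mode.startswith('\\'):
--             mode = mode[1:]
--             visible.append(None)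
--         elif c == '\\':
--             mode = '\\' + mode
--             visible.append(None)
--         elif mode:
--             if c == mode:
--                 mode = ''
--             visible.append(None)
--         elif c in ('"', "'"):
--             mode = c
--             visible.append(None)
--         else:
--             visible.append(c)
--     # Pass 2: plain bracket-depth scan over the mask.
--     depth = 0
--     for k, v in enumerate(visible):
--         if v in ('{', '[', '('):
--             depth += 1
--         elif v in ('}', ']', ')'):
--             depth -= 1
--         elif v == ';' and depth <= 0:
--             return script[start_index:start_index + k].strip(), start_index + k
--     return None, n
-- ===== Notes on version B (the rewrite author's own statement) =====
-- stated objective: alternative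
-- what changed: Replaced A's single loop over four state variables by two staged passes: pass 1 builds a visibility mask (None for escaped characters and string-literal content), pass 2 is a plain bracket-depth scan over that mask.
import Mathlib
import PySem

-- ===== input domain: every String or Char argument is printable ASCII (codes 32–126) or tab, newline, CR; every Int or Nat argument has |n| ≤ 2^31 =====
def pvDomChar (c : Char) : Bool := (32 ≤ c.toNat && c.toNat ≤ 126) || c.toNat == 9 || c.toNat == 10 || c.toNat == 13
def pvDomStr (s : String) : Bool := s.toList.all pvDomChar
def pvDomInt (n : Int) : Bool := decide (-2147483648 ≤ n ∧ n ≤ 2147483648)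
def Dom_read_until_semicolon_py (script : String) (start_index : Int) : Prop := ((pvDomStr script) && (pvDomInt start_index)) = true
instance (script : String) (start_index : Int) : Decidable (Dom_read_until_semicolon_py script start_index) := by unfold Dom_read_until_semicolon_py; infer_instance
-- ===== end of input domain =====

-- B replaces A's one loop over four state variables by two staged passes: pass 1 builds a
-- visibility mask (None for escaped / string-literal positions), pass 2 is a plain
-- bracket-depth scan over that mask; same return value wherever A returns.

-- ===== PORT A =====
-- A's single loop with state (i, depth, in_str, escape); char = script[i] is ported as
-- PySem.List.pyGetD …, written inline (Pre_ keeps the index in range, where Python would raise).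
-- fuel is only a termination device: the wrapper passes (len - start).toNat, which is enough
-- because i grows by 1 each iteration, so the fuel-0 branch is reached only when i ≥ len.
def rusAloop (cs : List Char) (start : Int) :
    Nat → Int → Int → Option Char → Bool → Option String × Int
  | 0, _, _, _, _ => (none, (cs.length : Int))
  | fuel+1, i, depth, instr, escape =>
    if i < (cs.length : Int) then
      if escape then rusAloop cs start fuel (i+1) depth instr false
      else if PySem.List.pyGetD cs i ' ' = '\\' then rusAloop cs start fuel (i+1) depth instr true
      else
        match instr with
        | some q =>
            if PySem.List.pyGetD cs i ' ' = q then rusAloop cs start fuel (i+1) depth none false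
            else rusAloop cs start fuel (i+1) depth (some q) false
        | none =>
            if PySem.List.pyGetD cs i ' ' = '"' ∨ PySem.List.pyGetD cs i ' ' = '\'' then
              rusAloop cs start fuel (i+1) depth (some (PySem.List.pyGetD cs i ' ')) false
            else if PySem.List.pyGetD cs i ' ' = '{' ∨ PySem.List.pyGetD cs i ' ' = '[' ∨ PySem.List.pyGetD cs i ' ' = '(' then
              rusAloop cs start fuel (i+1) (depth+1) none false
            else if PySem.List.pyGetD cs i ' ' = '}' ∨ PySem.List.pyGetD cs i ' ' = ']' ∨ PySem.List.pyGetD cs i ' ' = ')' then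
              rusAloop cs start fuel (i+1) (depth-1) none false
            else if PySem.List.pyGetD cs i ' ' = ';' ∧ depth ≤ 0 then
              (some (String.ofList (PySem.Chars.strip (PySem.List.slice cs (some start) (some i)))), i)
            else rusAloop cs start fuel (i+1) depth none false
    else (none, (cs.length : Int))

def read_until_semicolon_py (script : String) (start_index : Int) : Option String × Int :=
  rusAloop script.toList start_index
    (((script.toList.length : Int) - start_index).toNat) start_index 0 none false

-- ===== PORT B =====
-- Pass 1 of Source B: over the index list range(start_index, n), carrying the mode string
-- (ported as List Char: a '\\' head = escape pending, a quote = inside that string),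
-- emit none for masked positions and the character itself otherwise.
def rusBvis (cs : List Char) : List Int → List Char → List (Option Char)
  | [], _ => []
  | j :: js, mode =>
    if mode.head? = some '\\' then none :: rusBvis cs js mode.tail
    else if PySem.List.pyGetD cs j ' ' = '\\' then none :: rusBvis cs js ('\\' :: mode)
    else if mode ≠ [] then
      if mode = [PySem.List.pyGetD cs j ' '] then none :: rusBvis cs js []
      else none :: rusBvis cs js mode
    else if PySem.List.pyGetD cs j ' ' = '"' ∨ PySem.List.pyGetD cs j ' ' = '\'' then
      none :: rusBvis cs js [PySem.List.pyGetD cs j ' ']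
    else some (PySem.List.pyGetD cs j ' ') :: rusBvis cs js []

-- Pass 2 of Source B: enumerate over the mask with a bracket depth counter.
def rusBscan (cs : List Char) (start : Int) : List (Option Char) → Int → Int → Option String × Int
  | [], _, _ => (none, (cs.length : Int))
  | v :: vs, k, depth =>
    if v = some '{' ∨ v = some '[' ∨ v = some '(' then rusBscan cs start vs (k+1) (depth+1)
    else if v = some '}' ∨ v = some ']' ∨ v = some ')' then rusBscan cs start vs (k+1) (depth-1)
    else if v = some ';' ∧ depth ≤ 0 then
      (some (String.ofList (PySem.Chars.strip (PySem.List.slice cs (some start) (some (start + k))))), start + k)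
    else rusBscan cs start vs (k+1) depth

def read_until_semicolon_py_alt (script : String) (start_index : Int) : Option String × Int :=
  rusBscan script.toList start_index
    (rusBvis script.toList (PySem.List.pyRange start_index (script.toList.length : Int) 1) [])
    0 0

-- ===== PRECONDITION & SPEC =====
-- A (and B) raise IndexError exactly when start_index < -len(script): the first script[i] access
-- is then out of range. Pre_ excludes exactly those inputs; nothing else is excluded.
def Pre_read_until_semicolon_py (script : String) (start_index : Int) : Prop :=
  -(PySem.Str.len script) ≤ start_index
instance (script : String) (start_index : Int) : Decidable (Pre_read_until_semicolon_py script start_index) := by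
  unfold Pre_read_until_semicolon_py; infer_instance

def pvWitness_read_until_semicolon_py : String × Int := ("foo(a, b); bar", 0)

def Spec_read_until_semicolon_py (script : String) (start_index : Int) (out : Option String × Int) : Prop :=
  out = read_until_semicolon_py_alt script start_index
instance (script : String) (start_index : Int) (out : Option String × Int) :
    Decidable (Spec_read_until_semicolon_py script start_index out) := by
  unfold Spec_read_until_semicolon_py; infer_instance

-- ===== CLAIM (what is proved, stated in full; the proofs are below) =====
def Claim_equal_read_until_semicolon_py : Prop :=
  ∀ (script : String) (start_index : Int), Dom_read_until_semicolon_py script start_index →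
    Pre_read_until_semicolon_py script start_index →
    Spec_read_until_semicolon_py script start_index (read_until_semicolon_py script start_index)

-- ===== LEMMAS AND PROOFS =====

-- A's loop state (escape, in_str) rendered as B's mode string.
def rusMode (escape : Bool) (instr : Option Char) : List Char :=
  (if escape then ['\\'] else []) ++ instr.toList

theorem rusAloop_stop (cs : List Char) (start : Int) (f : Nat) (i depth : Int)
    (instr : Option Char) (escape : Bool) (hi : ¬ i < (cs.length : Int)) :
    rusAloop cs start f i depth instr escape = (none, (cs.length : Int)) := by
  cases f with
  | zero => rfl
  | succ f => cases instr with
    | some q => rw [rusAloop, if_neg hi]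
    | none => rw [rusAloop, if_neg hi]

theorem rusRange_nil (a b : Int) (h : ¬ a < b) : PySem.List.pyRange a b 1 = [] := by
  rw [PySem.List.pyRange_one]
  have : (b - a).toNat = 0 := by omega
  rw [this]; rfl

-- Main invariant: from any state, A's remaining loop equals B's scan of the mask that
-- pass 1 produces from the remaining indices and the corresponding mode string.
theorem rusA_eq_scan_vis (cs : List Char) (start : Int) :
    ∀ (fuel : Nat) (i depth : Int) (instr : Option Char) (escape : Bool) (fA : Nat),
      (∀ q, instr = some q → q ≠ '\\') →
      ((cs.length : Int) - i).toNat ≤ fuel → ((cs.length : Int) - i).toNat ≤ fA →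
      rusAloop cs start fA i depth instr escape =
        rusBscan cs start
          (rusBvis cs (PySem.List.pyRange i (cs.length : Int) 1) (rusMode escape instr))
          (i - start) depth := by
  intro fuel
  induction fuel with
  | zero =>
      intro i depth instr escape fA _ hk _
      have hi : ¬ i < (cs.length : Int) := by omega
      rw [rusAloop_stop cs start fA i depth instr escape hi, rusRange_nil i _ hi]
      rfl
  | succ fuel ih =>
      intro i depth instr escape fA hq hk hA
      by_cases hi : i < (cs.length : Int)
      case neg =>
        rw [rusAloop_stop cs start fA i depth instr escape hi, rusRange_nil i _ hi]
        rfl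
      obtain ⟨fA', rfl⟩ : ∃ m, fA = m + 1 := ⟨fA - 1, by omega⟩
      rw [PySem.List.pyRange_one_cons hi]
      set c := PySem.List.pyGetD cs i ' ' with hc
      have hstep : i + 1 - start = i - start + 1 := by omega
      cases escape with
      | true =>
          -- A: consume the escaped char; B: mode starts with '\\', mask none, drop the prefix.
          cases instr with
          | none =>
              rw [rusAloop, if_pos hi, if_pos rfl, rusBvis,
                if_pos (show (rusMode true none).head? = some '\\' from rfl), rusBscan]
              simp only [reduceCtorEq, false_or, false_and, if_false]
              rw [← hstep]
              exact ih (i+1) depth none false fA' hq (by omega) (by omega)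
          | some q =>
              rw [rusAloop, if_pos hi, if_pos rfl, rusBvis,
                if_pos (show (rusMode true (some q)).head? = some '\\' from rfl), rusBscan]
              simp only [reduceCtorEq, false_or, false_and, if_false]
              rw [← hstep]
              exact ih (i+1) depth (some q) false fA' hq (by omega) (by omega)
      | false =>
          cases instr with
          | some q =>
              -- inside a string (or about to escape): B's mode is [q], possibly pushed on.
              have hqq : q ≠ '\\' := hq q rfl
              have hhd : ¬ (rusMode false (some q)).head? = some '\\' := by
                simp [rusMode, hqq]
              have hmne : rusMode false (some q) ≠ [] := by simp [rusMode]
              rw [rusAloop, if_pos hi]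
              simp only [Bool.false_eq_true, if_false]
              rw [rusBvis, if_neg hhd, ← hc]
              by_cases hcb : c = '\\'
              · rw [if_pos hcb, if_pos hcb, rusBscan]
                simp only [reduceCtorEq, false_or, false_and, if_false]
                rw [← hstep]
                have : '\\' :: rusMode false (some q) = rusMode true (some q) := rfl
                rw [this]
                exact ih (i+1) depth (some q) true fA' hq (by omega) (by omega)
              · rw [if_neg hcb, if_neg hcb, if_pos hmne]
                by_cases hcq : c = q
                · have hm1 : rusMode false (some q) = [c] := by simp [rusMode, hcq]
                  rw [if_pos hcq, if_pos hm1, rusBscan]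
                  simp only [reduceCtorEq, false_or, false_and, if_false]
                  rw [← hstep]
                  exact ih (i+1) depth none false fA' (by intro q h; cases h) (by omega) (by omega)
                · have hm1 : ¬ rusMode false (some q) = [c] := by
                    simp [rusMode]; exact fun h => hcq h.symm
                  rw [if_neg hcq, if_neg hm1, rusBscan]
                  simp only [reduceCtorEq, false_or, false_and, if_false]
                  rw [← hstep]
                  exact ih (i+1) depth (some q) false fA' hq (by omega) (by omega)
          | none =>
              have hhd : ¬ (rusMode false none).head? = some '\\' := by simp [rusMode]
              have hmn : ¬ rusMode false none ≠ [] := by simp [rusMode]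
              rw [rusAloop, if_pos hi]
              simp only [Bool.false_eq_true, if_false]
              rw [rusBvis, if_neg hhd, ← hc]
              by_cases hcb : c = '\\'
              · rw [if_pos hcb, if_pos hcb, rusBscan]
                simp only [reduceCtorEq, false_or, false_and, if_false]
                rw [← hstep]
                have : '\\' :: rusMode false none = rusMode true none := rfl
                rw [this]
                exact ih (i+1) depth none true fA' hq (by omega) (by omega)
              · rw [if_neg hcb, if_neg hcb, if_neg hmn]
                by_cases hq2 : c = '"' ∨ c = '\''
                · -- open a string literal
                  rw [if_pos hq2, if_pos hq2, rusBscan]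
                  simp only [reduceCtorEq, false_or, false_and, if_false]
                  rw [← hstep]
                  have : [c] = rusMode false (some c) := by simp [rusMode]
                  rw [this]
                  exact ih (i+1) depth (some c) false fA'
                    (by intro q h; cases h; exact hcb) (by omega) (by omega)
                · rw [if_neg hq2, if_neg hq2, rusBscan]
                  by_cases ho : c = '{' ∨ c = '[' ∨ c = '('
                  · have hov : some c = some '{' ∨ some c = some '[' ∨ some c = some '(' := by
                      rcases ho with h|h|h <;> simp [h]
                    rw [if_pos ho, if_pos hov, ← hstep]
                    exact ih (i+1) (depth+1) none false fA' (by intro q h; cases h) (by omega) (by omega)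
                  · have hov : ¬ (some c = some '{' ∨ some c = some '[' ∨ some c = some '(') := by
                      simpa using ho
                    rw [if_neg ho, if_neg hov]
                    by_cases hcl : c = '}' ∨ c = ']' ∨ c = ')'
                    · have hclv : some c = some '}' ∨ some c = some ']' ∨ some c = some ')' := by
                        rcases hcl with h|h|h <;> simp [h]
                      rw [if_pos hcl, if_pos hclv, ← hstep]
                      exact ih (i+1) (depth-1) none false fA' (by intro q h; cases h) (by omega) (by omega)
                    · have hclv : ¬ (some c = some '}' ∨ some c = some ']' ∨ some c = some ')') := by
                        simpa using hcl
                      rw [if_neg hcl, if_neg hclv]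
                      by_cases hs : c = ';' ∧ depth ≤ 0
                      · have hsv : some c = some ';' ∧ depth ≤ 0 := ⟨by simp [hs.1], hs.2⟩
                        rw [if_pos hs, if_pos hsv]
                        have : start + (i - start) = i := by omega
                        rw [this]
                      · have hsv : ¬ (some c = some ';' ∧ depth ≤ 0) := by
                          simpa using hs
                        rw [if_neg hs, if_neg hsv, ← hstep]
                        exact ih (i+1) depth none false fA' (by intro q h; cases h) (by omega) (by omega)

-- ===== VERDICT (by name: the statement is the Claim_ definition above) =====
theorem read_until_semicolon_py_spec : Claim_equal_read_until_semicolon_py := by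
  intro script start_index _ _
  unfold Spec_read_until_semicolon_py read_until_semicolon_py read_until_semicolon_py_alt
  have h := rusA_eq_scan_vis script.toList start_index
    (((script.toList.length : Int) - start_index).toNat) start_index 0 none false
    (((script.toList.length : Int) - start_index).toNat)
    (by intro q h; cases h) le_rfl le_rfl
  simpa [rusMode] using h
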